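-- pv_equiv track=rewrite | github.com/nemametrix/nemacquire_stable | nemacquire/ui/camera_settings_test.py | is_dict_equivalent
-- ===== SOURCE A (Python) =====
-- def is_dict_equivalent(dict1, dict2):
--
--
--     #all keys in 1 exist in 2, all keys in 2 exist in 1
--     #implies they have same keys
--
--     for k in dict1:
--         if k in dict2:
--             if dict2[k] == dict1[k]:
--                 pass
--             else:
--                 return False
--         else :
--             return False
--
--
--     for k in dict2:
--
--         if k in dict1:
--             if dict2[k] == dict1[k]:
--                 pass
--             else:
--                 return False
--         else :
--             return False
--
--     return True
-- ===== SOURCE B (Python) =====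
-- def is_dict_equivalent(dict1, dict2):
--     # canonicalize: two dicts are equivalent iff their key-sorted item lists coincide
--     return sorted(dict1.items(), key=lambda kv: kv[0]) == sorted(dict2.items(), key=lambda kv: kv[0])
-- ===== Notes on version B (the rewrite author's own statement) =====
-- stated objective: simpler
-- what changed: B canonicalizes both dicts into item lists sorted by key and compares the two sorted lists, replacing A's two interleaved membership-and-lookup loops with a one-line sort-then-compare; Pre_ only states the dict invariant (distinct keys), which every Python dict satisfies.
import Mathlib
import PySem

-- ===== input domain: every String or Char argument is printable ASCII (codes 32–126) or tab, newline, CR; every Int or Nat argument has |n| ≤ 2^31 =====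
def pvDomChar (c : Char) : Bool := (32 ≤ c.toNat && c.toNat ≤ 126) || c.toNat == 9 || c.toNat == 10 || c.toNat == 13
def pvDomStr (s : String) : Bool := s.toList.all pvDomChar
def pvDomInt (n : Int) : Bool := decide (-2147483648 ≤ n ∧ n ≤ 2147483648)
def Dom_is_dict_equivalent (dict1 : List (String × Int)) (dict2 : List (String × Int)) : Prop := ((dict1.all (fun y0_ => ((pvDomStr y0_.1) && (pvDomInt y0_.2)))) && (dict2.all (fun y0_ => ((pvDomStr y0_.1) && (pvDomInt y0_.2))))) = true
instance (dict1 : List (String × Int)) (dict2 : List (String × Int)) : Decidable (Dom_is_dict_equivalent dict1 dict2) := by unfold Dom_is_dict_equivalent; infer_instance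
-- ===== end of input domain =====

-- B canonicalizes both dicts into item lists sorted by key and compares the two
-- sorted lists, replacing A's two membership-and-lookup loops (objective: simpler).

-- shared dict primitive: d[k] as first-match lookup (Python dict lookup)
def pvGet (d : List (String × Int)) (k : String) : Option Int :=
  (d.find? (fun p => p.1 == k)).map (·.2)

-- ===== PORT A =====
-- first loop of A: for k in dict1: if k in dict2: if dict2[k]==dict1[k]: pass else return False else return False
def pvLoop1 (dict1 dict2 : List (String × Int)) : List String → Bool
  | [] => true
  | k :: ks =>
    if (pvGet dict2 k).isSome then
      if pvGet dict2 k == pvGet dict1 k then pvLoop1 dict1 dict2 ks else false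
    else false

-- second loop of A: for k in dict2: if k in dict1: if dict2[k]==dict1[k]: pass else return False else return False
def pvLoop2 (dict1 dict2 : List (String × Int)) : List String → Bool
  | [] => true
  | k :: ks =>
    if (pvGet dict1 k).isSome then
      if pvGet dict2 k == pvGet dict1 k then pvLoop2 dict1 dict2 ks else false
    else false

def is_dict_equivalent (dict1 : List (String × Int)) (dict2 : List (String × Int)) : Bool :=
  if pvLoop1 dict1 dict2 (dict1.map (·.1)) then
    pvLoop2 dict1 dict2 (dict2.map (·.1))
  else false

-- ===== PORT B =====
-- sorted(d.items(), key=lambda kv: kv[0]) == sorted(...) — compare key-sorted item lists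
def is_dict_equivalent_alt (dict1 : List (String × Int)) (dict2 : List (String × Int)) : Bool :=
  PySem.List.sorted dict1 (fun kv => kv.1) false == PySem.List.sorted dict2 (fun kv => kv.1) false

-- ===== PRECONDITION & SPEC =====
-- Pre_ states only the dict representation invariant: keys are pairwise distinct,
-- which every Python dict satisfies by construction (no Python input is excluded).
def Pre_is_dict_equivalent (dict1 : List (String × Int)) (dict2 : List (String × Int)) : Prop :=
  (dict1.map (·.1)).Nodup ∧ (dict2.map (·.1)).Nodup
instance (dict1 : List (String × Int)) (dict2 : List (String × Int)) : Decidable (Pre_is_dict_equivalent dict1 dict2) := by unfold Pre_is_dict_equivalent; infer_instance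

def pvWitness_is_dict_equivalent : (List (String × Int)) × (List (String × Int)) :=
  ([("a", 1), ("b", 2)], [("b", 2), ("a", 1)])

def Spec_is_dict_equivalent (dict1 : List (String × Int)) (dict2 : List (String × Int)) (out : Bool) : Prop := out = is_dict_equivalent_alt dict1 dict2
instance (dict1 : List (String × Int)) (dict2 : List (String × Int)) (out : Bool) : Decidable (Spec_is_dict_equivalent dict1 dict2 out) := by unfold Spec_is_dict_equivalent; infer_instance

-- ===== CLAIM (what is proved, stated in full; the proofs are below) =====
def Claim_equal_is_dict_equivalent : Prop := ∀ (dict1 : List (String × Int)) (dict2 : List (String × Int)), Dom_is_dict_equivalent dict1 dict2 → Pre_is_dict_equivalent dict1 dict2 → Spec_is_dict_equivalent dict1 dict2 (is_dict_equivalent dict1 dict2)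

-- ===== LEMMAS AND PROOFS =====

theorem pvGet_isSome_iff_mem (d : List (String × Int)) (k : String) :
    (pvGet d k).isSome ↔ k ∈ d.map (·.1) := by
  simp [pvGet, List.find?_isSome, List.mem_map]

theorem pvLoop1_iff (dict1 dict2 : List (String × Int)) (ks : List String) :
    pvLoop1 dict1 dict2 ks = true ↔
      ∀ k ∈ ks, (pvGet dict2 k).isSome ∧ pvGet dict2 k = pvGet dict1 k := by
  induction ks with
  | nil => simp [pvLoop1]
  | cons k ks ih =>
    simp only [pvLoop1, List.mem_cons]
    split_ifs with h1 h2
    · rw [ih]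
      constructor
      · rintro h x (rfl | hx)
        · exact ⟨h1, beq_iff_eq.mp h2⟩
        · exact h x hx
      · intro h x hx; exact h x (Or.inr hx)
    · simp only [false_iff]
      intro h
      exact h2 (beq_iff_eq.mpr (h k (Or.inl rfl)).2)
    · simp only [false_iff]
      intro h
      exact h1 (h k (Or.inl rfl)).1

theorem pvLoop2_iff (dict1 dict2 : List (String × Int)) (ks : List String) :
    pvLoop2 dict1 dict2 ks = true ↔
      ∀ k ∈ ks, (pvGet dict1 k).isSome ∧ pvGet dict2 k = pvGet dict1 k := by
  induction ks with
  | nil => simp [pvLoop2]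
  | cons k ks ih =>
    simp only [pvLoop2, List.mem_cons]
    split_ifs with h1 h2
    · rw [ih]
      constructor
      · rintro h x (rfl | hx)
        · exact ⟨h1, beq_iff_eq.mp h2⟩
        · exact h x hx
      · intro h x hx; exact h x (Or.inr hx)
    · simp only [false_iff]
      intro h
      exact h2 (beq_iff_eq.mpr (h k (Or.inl rfl)).2)
    · simp only [false_iff]
      intro h
      exact h1 (h k (Or.inl rfl)).1

-- A = true ↔ both loop conditions hold
theorem a_iff (dict1 dict2 : List (String × Int)) :
    is_dict_equivalent dict1 dict2 = true ↔
      (∀ k ∈ dict1.map (·.1), (pvGet dict2 k).isSome ∧ pvGet dict2 k = pvGet dict1 k) ∧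
      (∀ k ∈ dict2.map (·.1), (pvGet dict1 k).isSome ∧ pvGet dict2 k = pvGet dict1 k) := by
  unfold is_dict_equivalent
  by_cases h1 : pvLoop1 dict1 dict2 (dict1.map (·.1)) = true
  · rw [h1, if_pos rfl, pvLoop2_iff]
    rw [pvLoop1_iff] at h1
    exact ⟨fun h => ⟨h1, h⟩, fun h => h.2⟩
  · rw [Bool.not_eq_true] at h1
    rw [h1]
    simp only [Bool.false_eq_true, if_false, false_iff]
    intro hc
    have : pvLoop1 dict1 dict2 (dict1.map (·.1)) = true := (pvLoop1_iff _ _ _).mpr hc.1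
    rw [h1] at this
    exact Bool.false_ne_true this

-- with distinct keys, first-match lookup is plain membership
theorem pvGet_eq_some_iff_mem (d : List (String × Int)) (k : String) (v : Int)
    (hnd : (d.map (·.1)).Nodup) : pvGet d k = some v ↔ (k, v) ∈ d := by
  induction d with
  | nil => simp [pvGet]
  | cons a t ih =>
    rw [List.map_cons, List.nodup_cons] at hnd
    obtain ⟨ha, ht⟩ := hnd
    by_cases hk : a.1 = k
    · have hg : pvGet (a :: t) k = some a.2 := by
        simp [pvGet, hk]
      rw [hg, List.mem_cons]
      constructor
      · intro h
        simp only [Option.some.injEq] at h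
        exact Or.inl (Prod.ext_iff.mpr ⟨hk.symm, h.symm⟩)
      · rintro (h | h)
        · rw [← h]
        · have hmem : a.1 ∈ t.map (·.1) := by
            rw [hk]; exact List.mem_map.mpr ⟨(k, v), h, rfl⟩
          exact absurd hmem ha
    · have hg : pvGet (a :: t) k = pvGet t k := by
        simp [pvGet, hk]
      rw [hg, ih ht, List.mem_cons]
      constructor
      · exact Or.inr
      · rintro (h | h)
        · exact absurd (congrArg Prod.fst h).symm hk
        · exact h

-- sorted-by-key lists are equal iff the item lists are permutations (keys distinct)
theorem sorted_eq_iff_perm (d1 d2 : List (String × Int))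
    (h1 : (d1.map (·.1)).Nodup) :
    PySem.List.sorted d1 (fun kv => kv.1) false = PySem.List.sorted d2 (fun kv => kv.1) false
      ↔ d1.Perm d2 := by
  constructor
  · intro h
    have p1 := PySem.List.sorted_perm (xs := d1) (key := fun kv => kv.1) (rev := false)
    have p2 := PySem.List.sorted_perm (xs := d2) (key := fun kv => kv.1) (rev := false)
    exact (p1.symm.trans (h ▸ p2))
  · intro hp
    have p1 := PySem.List.sorted_perm (xs := d1) (key := fun kv => kv.1) (rev := false)
    have hle : (PySem.List.sorted d1 (fun kv => kv.1) false).Pairwise (fun a b => a.1 ≤ b.1) :=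
      PySem.List.sorted_pairwise (xs := d1) (key := fun kv => kv.1)
    have hndk : ((PySem.List.sorted d1 (fun kv => kv.1) false).map (·.1)).Nodup :=
      (p1.map (·.1)).nodup_iff.mpr h1
    have hne : (PySem.List.sorted d1 (fun kv => kv.1) false).Pairwise (fun a b => a.1 ≠ b.1) := by
      simp only [List.Nodup, List.pairwise_map] at hndk
      exact hndk
    have hlt : (PySem.List.sorted d1 (fun kv => kv.1) false).Pairwise (fun a b => a.1 < b.1) :=
      (hle.and hne).imp (fun h => lt_of_le_of_ne h.1 h.2)
    exact (PySem.List.sorted_eq_of_perm_of_pairwise_lt _ _ _ (p1.trans hp) hlt).symm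

-- ===== VERDICT (by name: the statement is the Claim_ definition above) =====
theorem is_dict_equivalent_spec : Claim_equal_is_dict_equivalent := by
  intro dict1 dict2 _ hpre
  obtain ⟨h1, h2⟩ := hpre
  unfold Spec_is_dict_equivalent
  have key : is_dict_equivalent dict1 dict2 = true ↔ is_dict_equivalent_alt dict1 dict2 = true := by
    rw [a_iff]
    unfold is_dict_equivalent_alt
    rw [beq_iff_eq, sorted_eq_iff_perm dict1 dict2 h1,
      List.perm_ext_iff_of_nodup (h1.of_map) (h2.of_map)]
    constructor
    · rintro ⟨ha, hb⟩ ⟨k, v⟩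
      rw [← pvGet_eq_some_iff_mem _ _ _ h1, ← pvGet_eq_some_iff_mem _ _ _ h2]
      constructor
      · intro hv
        have hk : k ∈ dict1.map (·.1) := by
          rw [← pvGet_isSome_iff_mem]; simp [hv]
        rw [(ha k hk).2, hv]
      · intro hv
        have hk : k ∈ dict2.map (·.1) := by
          rw [← pvGet_isSome_iff_mem]; simp [hv]
        rw [← (hb k hk).2, hv]
    · intro hm
      constructor
      · intro k hk
        obtain ⟨v, hv⟩ := Option.isSome_iff_exists.mp ((pvGet_isSome_iff_mem dict1 k).mpr hk)
        have hv2 : pvGet dict2 k = some v := by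
          rw [pvGet_eq_some_iff_mem _ _ _ h2, ← hm (k, v), ← pvGet_eq_some_iff_mem _ _ _ h1]
          exact hv
        exact ⟨by simp [hv2], by rw [hv, hv2]⟩
      · intro k hk
        obtain ⟨v, hv⟩ := Option.isSome_iff_exists.mp ((pvGet_isSome_iff_mem dict2 k).mpr hk)
        have hv1 : pvGet dict1 k = some v := by
          rw [pvGet_eq_some_iff_mem _ _ _ h1, hm (k, v), ← pvGet_eq_some_iff_mem _ _ _ h2]
          exact hv
        exact ⟨by simp [hv1], by rw [hv, hv1]⟩
  cases ha : is_dict_equivalent dict1 dict2 <;> cases hb : is_dict_equivalent_alt dict1 dict2 <;>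
    simp [ha, hb] at key ⊢
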